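-- pv_equiv track=rewrite | github.com/alexsab-ru/astro-components | .github/scripts/image_mirror.py | parse_image_urls
-- ===== SOURCE A (Python) =====
-- def parse_image_urls(values: list[str]) -> list[str]:
--     urls = []
--     for value in values:
--         for chunk in value.replace("|", "\n").splitlines():
--             chunk = chunk.strip()
--             if chunk:
--                 urls.append(chunk)
--     return urls
-- ===== SOURCE B (Python) =====
-- # Single-pass character state machine: instead of replace/splitlines/strip, scan each
-- # value once, cutting tokens at '|', '\n', '\r' and trimming edge spaces/tabs on the fly
-- # (exact on the task's printable-ASCII + tab/CR/LF input domain).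
-- def _scan(value):
--     tokens = []
--     tok = ""
--     pend = ""  # run of interior whitespace not yet known to be interior
--     for c in value:
--         if c in "|\n\r":
--             if tok:
--                 tokens.append(tok)
--             tok = ""
--             pend = ""
--         elif c in " \t":
--             if tok:
--                 pend += c
--         else:
--             tok += pend + c
--             pend = ""
--     if tok:
--         tokens.append(tok)
--     return tokens
--
-- def parse_image_urls(values: list[str]) -> list[str]:
--     urls = []
--     for value in values:
--         urls.extend(_scan(value))
--     return urls
-- ===== Notes on version B (the rewrite author's own statement) =====
-- stated objective: alternative
-- what changed: B replaces A's replace/splitlines/strip pipeline with a single-pass character state machine that cuts tokens at '|'/'\n'/'\r' and trims edge spaces/tabs on the fly via a pending-whitespace buffer (exact on the task's ASCII+tab/CR/LF domain, which is what the claim quantifies over).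
import Mathlib
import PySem

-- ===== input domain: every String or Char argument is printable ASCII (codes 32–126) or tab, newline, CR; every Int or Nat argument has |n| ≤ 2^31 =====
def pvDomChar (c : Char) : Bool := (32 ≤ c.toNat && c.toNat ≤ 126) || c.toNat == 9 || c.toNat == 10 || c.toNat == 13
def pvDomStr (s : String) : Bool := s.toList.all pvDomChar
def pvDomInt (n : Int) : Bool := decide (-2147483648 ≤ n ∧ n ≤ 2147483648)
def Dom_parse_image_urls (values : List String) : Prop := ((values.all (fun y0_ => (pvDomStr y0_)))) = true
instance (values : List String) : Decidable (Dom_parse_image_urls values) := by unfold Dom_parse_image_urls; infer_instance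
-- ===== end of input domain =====

-- B replaces A's replace/splitlines/strip pipeline by a one-pass character state machine
-- (tokens cut at '|','\n','\r', edge spaces/tabs trimmed on the fly), exact on the domain above.

-- ===== PORT A =====
def parse_image_urls (values : List String) : List String :=
  values.foldl (fun urls value =>
    (PySem.Str.splitlines (PySem.Str.replace value "|" "\n")).foldl
      (fun urls chunk =>
        let c := PySem.Str.strip chunk
        if c ≠ "" then urls ++ [c] else urls) urls) []

-- ===== PORT B =====
-- the scanner runs on the char list of the string (exact: Python iterates code points)
def pi_scanGo : List Char → List Char → List Char → List (List Char) → List (List Char)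
  | [], tok, _pend, tokens => if tok ≠ [] then tokens ++ [tok] else tokens
  | c :: rest, tok, pend, tokens =>
    if c = '|' ∨ c = '\n' ∨ c = '\r' then
      pi_scanGo rest [] [] (if tok ≠ [] then tokens ++ [tok] else tokens)
    else if c = ' ' ∨ c = '\t' then
      pi_scanGo rest tok (if tok ≠ [] then pend ++ [c] else pend) tokens
    else
      pi_scanGo rest (tok ++ pend ++ [c]) [] tokens

def pi_scan (value : String) : List String :=
  (pi_scanGo value.toList [] [] []).map String.ofList

def parse_image_urls_alt (values : List String) : List String :=
  values.foldl (fun urls value => urls ++ pi_scan value) []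

-- ===== PRECONDITION & SPEC =====
def Spec_parse_image_urls (values : List String) (out : List String) : Prop := out = parse_image_urls_alt values
instance (values : List String) (out : List String) : Decidable (Spec_parse_image_urls values out) := by unfold Spec_parse_image_urls; infer_instance

-- ===== CLAIM (what is proved, stated in full; the proofs are below) =====
def Claim_equal_parse_image_urls : Prop := ∀ (values : List String), Dom_parse_image_urls values → Spec_parse_image_urls values (parse_image_urls values)

-- ===== LEMMAS AND PROOFS =====

def pvIsB (c : Char) : Bool :=
  decide (c.toNat = 10) || decide (c.toNat = 13) || decide (c.toNat = 11) || decide (c.toNat = 12) ||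
  decide (c.toNat = 28) || decide (c.toNat = 29) || decide (c.toNat = 30) ||
  decide (c.toNat = 133) || decide (c.toNat = 8232) || decide (c.toNat = 8233)

def myGo : List Char → List Char → List (List Char)
  | [], cur => if cur.isEmpty then [] else [cur.reverse]
  | c :: rest, cur =>
    if c = '\r' ∧ rest.head? = some '\n' then cur.reverse :: myGo rest.tail []
    else if pvIsB c then cur.reverse :: myGo rest []
    else myGo rest (c :: cur)
termination_by l _ => l.length
decreasing_by all_goals simp

theorem go_eq : ∀ (l cur : List Char) (acc : List (List Char)),
    PySem.Chars.splitlines.go pvIsB l cur acc = acc.reverse ++ myGo l cur := by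
  intro l
  induction hn : l.length using Nat.strong_induction_on generalizing l with
  | _ n ih =>
  intro cur acc
  rw [PySem.Chars.splitlines.go.eq_def]
  split
  · rw [myGo]; split <;> simp_all [List.isEmpty_iff]
  · rename_i rest
    rw [ih (rest.length) (by subst hn; simp) rest rfl, myGo,
       if_pos (by simp : ('\r' = '\r' ∧ (('\n'::rest).head? = some '\n')))]
    simp
  · rename_i c rest hne
    rw [myGo]
    have hnot : ¬ (c = '\r' ∧ rest.head? = some '\n') := by
      rintro ⟨rfl, hh⟩
      cases rest with
      | nil => simp at hh
      | cons d t => simp at hh; subst hh; exact hne t rfl rfl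
    rw [if_neg hnot]
    by_cases hb : pvIsB c = true
    · rw [if_pos hb, if_pos hb, ih rest.length (by subst hn; simp) rest rfl]
      simp
    · rw [if_neg hb, if_neg hb, ih rest.length (by subst hn; simp) rest rfl]

theorem splitlines_eq (s : List Char) : PySem.Chars.splitlines s = myGo s [] := by
  have h : PySem.Chars.splitlines s = PySem.Chars.splitlines.go pvIsB s [] [] := rfl
  rw [h, go_eq]; simp

def pvF (ls : List (List Char)) : List (List Char) :=
  (ls.map PySem.Chars.strip).filter (fun l => l ≠ [])

theorem myGo_nil (cur : List Char) :
    myGo [] cur = if cur.isEmpty then [] else [cur.reverse] := by rw [myGo]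

theorem myGo_cons (c : Char) (rest cur : List Char) :
    myGo (c :: rest) cur =
      if c = '\r' ∧ rest.head? = some '\n' then cur.reverse :: myGo rest.tail []
      else if pvIsB c then cur.reverse :: myGo rest []
      else myGo rest (c :: cur) := by rw [myGo]

theorem pvF_cons (a : List Char) (ls : List (List Char)) :
    pvF (a :: ls) = (if PySem.Chars.strip a ≠ [] then [PySem.Chars.strip a] else []) ++ pvF ls := by
  simp [pvF, List.filter_cons]; split <;> simp_all

def pvPf (c : Char) : Char := if c = '|' then '\n' else c

theorem replace_go_eq : ∀ (fuel : Nat) (l : List Char) (acc : List Char), l.length ≤ fuel →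
    PySem.Chars.replace.go ['|'] ['\n'] fuel l acc = acc.reverse ++ l.map pvPf := by
  intro fuel
  induction fuel with
  | zero =>
    intro l acc h
    have : l = [] := by cases l <;> simp_all
    subst this
    rw [PySem.Chars.replace.go]
    simp
  | succ n ih =>
    intro l acc h
    cases l with
    | nil => rw [PySem.Chars.replace.go]; simp; omega
    | cons c t =>
      rw [PySem.Chars.replace.go]
      by_cases hc : c = '|'
      · subst hc
        rw [if_pos (by simp [List.isPrefixOf])]
        rw [ih _ _ (by simpa using h)]
        simp [pvPf]
      · rw [if_neg (by simp [List.isPrefixOf, Ne.symm hc])]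
        rw [ih _ _ (by simpa using h)]
        simp [pvPf, hc]

theorem replace_single (cs : List Char) : PySem.Chars.replace cs ['|'] ['\n'] = cs.map pvPf := by
  rw [PySem.Chars.replace]
  rw [if_neg (by simp)]
  rw [replace_go_eq cs.length cs [] le_rfl]
  simp

-- per-value contribution of A, String level
def pvGs (v : String) : List String :=
  ((PySem.Str.splitlines (PySem.Str.replace v "|" "\n")).map PySem.Str.strip).filter
    (fun s => s ≠ "")

theorem innerA (l : List String) : ∀ (acc : List String),
    l.foldl (fun urls chunk =>
      let c := PySem.Str.strip chunk
      if c ≠ "" then urls ++ [c] else urls) acc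
    = acc ++ (l.map PySem.Str.strip).filter (fun s => s ≠ "") := by
  induction l with
  | nil => intro acc; simp
  | cons h t ih =>
    intro acc
    simp only [List.foldl_cons, List.map_cons, List.filter_cons]
    by_cases hh : PySem.Str.strip h ≠ ""
    · rw [if_pos hh, ih]
      simp [hh]
    · rw [if_neg hh, ih]
      simp at hh
      simp [hh]

theorem A_eq (values : List String) : ∀ (acc : List String),
    values.foldl (fun urls value =>
      (PySem.Str.splitlines (PySem.Str.replace value "|" "\n")).foldl
        (fun urls chunk =>
          let c := PySem.Str.strip chunk
          if c ≠ "" then urls ++ [c] else urls) urls) acc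
    = acc ++ values.flatMap pvGs := by
  induction values with
  | nil => intro acc; simp
  | cons v t ih =>
    intro acc
    simp only [List.foldl_cons]
    rw [innerA, ih]
    simp [pvGs]

theorem B_eq (values : List String) : ∀ (acc : List String),
    values.foldl (fun urls value => urls ++ pi_scan value) acc
    = acc ++ values.flatMap pi_scan := by
  induction values with
  | nil => intro acc; simp
  | cons v t ih => intro acc; simp only [List.foldl_cons]; rw [ih]; simp

theorem filter_map_toList (xs : List String) :
    (xs.filter (fun s => s ≠ "")).map String.toList
      = (xs.map String.toList).filter (fun l => l ≠ []) := by
  induction xs with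
  | nil => simp
  | cons h t ih =>
    simp only [List.filter_cons, List.map_cons]
    by_cases hh : h = ""
    · subst hh; simpa using ih
    · have : h.toList ≠ [] := by simpa [String.toList_eq_nil_iff] using hh
      simp [hh, this]
      simpa using ih

theorem gs_toList (v : String) :
    (pvGs v).map String.toList = pvF (myGo (PySem.Chars.replace v.toList ['|'] ['\n']) []) := by
  unfold pvGs
  rw [filter_map_toList, List.map_map]
  have hcomp : (String.toList ∘ PySem.Str.strip) = (PySem.Chars.strip ∘ String.toList) := by
    funext s; simp [PySem.Str.toList_strip]
  rw [hcomp, ← List.map_map, PySem.Str.splitlines_map_toList, PySem.Str.toList_replace]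
  rw [show ("|" : String).toList = ['|'] from rfl, show ("\n" : String).toList = ['\n'] from rfl,
      splitlines_eq]
  rfl

-- character classes on the domain
def pvSep (c : Char) : Prop := c = '|' ∨ c = '\n' ∨ c = '\r'
def pvWs (c : Char) : Prop := c = ' ' ∨ c = '\t'

theorem ws_isspace {c : Char} (h : pvWs c) : PySem.Chars.isspace c = true := by
  rcases h with rfl | rfl <;> decide

theorem char_eq_iff_toNat (c d : Char) : c = d ↔ c.toNat = d.toNat := by
  constructor
  · rintro rfl; rfl
  · intro h; exact Char.ext (UInt32.toNat.inj h)

theorem good_char {c : Char} (hd : pvDomChar c = true) (hs : ¬ pvSep c) (hw : ¬ pvWs c) :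
    pvIsB c = false ∧ PySem.Chars.isspace c = false := by
  simp [pvDomChar] at hd
  have h124 : c.toNat ≠ 124 := fun h => hs (Or.inl ((char_eq_iff_toNat c '|').mpr (h.trans (by decide))))
  have h10 : c.toNat ≠ 10 := fun h => hs (Or.inr (Or.inl ((char_eq_iff_toNat c '\n').mpr (h.trans (by decide)))))
  have h13 : c.toNat ≠ 13 := fun h => hs (Or.inr (Or.inr ((char_eq_iff_toNat c '\r').mpr (h.trans (by decide)))))
  have h32 : c.toNat ≠ 32 := fun h => hw (Or.inl ((char_eq_iff_toNat c ' ').mpr (h.trans (by decide))))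
  have h9 : c.toNat ≠ 9 := fun h => hw (Or.inr ((char_eq_iff_toNat c '\t').mpr (h.trans (by decide))))
  constructor <;> simp [pvIsB, PySem.Chars.isspace] <;> omega

-- invariant on the scanner token: its first and last characters are domain characters
-- that are neither separators nor space/tab
def pvGood (c : Char) : Prop := pvDomChar c = true ∧ ¬ pvSep c ∧ ¬ pvWs c

def pvTokOK (tok : List Char) : Prop :=
  (∀ x, tok.head? = some x → pvGood x) ∧ (∀ x, tok.getLast? = some x → pvGood x)

theorem dropWhile_append_all {p : Char → Bool} {a b : List Char}
    (h : ∀ c ∈ a, p c = true) : List.dropWhile p (a ++ b) = List.dropWhile p b := by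
  induction a with
  | nil => simp
  | cons x t ih =>
    simp only [List.cons_append, List.dropWhile_cons]
    rw [if_pos (h x (by simp))]
    exact ih (fun c hc => h c (by simp [hc]))

theorem strip_sandwich (lead tok pend : List Char)
    (hl : ∀ c ∈ lead, pvWs c) (hp : ∀ c ∈ pend, pvWs c)
    (he : tok = [] → pend = []) (ht : pvTokOK tok) :
    PySem.Chars.strip (lead ++ tok ++ pend) = tok := by
  by_cases h0 : tok = []
  · subst h0
    rw [he rfl]
    simp only [List.append_nil]
    unfold PySem.Chars.strip PySem.Chars.lstrip PySem.Chars.rstrip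
    have hld : List.dropWhile PySem.Chars.isspace lead = [] := by
      rw [List.dropWhile_eq_nil_iff]
      exact fun c hc => ws_isspace (hl c hc)
    rw [hld]
    decide
  · unfold PySem.Chars.strip PySem.Chars.lstrip PySem.Chars.rstrip
    rw [List.append_assoc, dropWhile_append_all (fun c hc => ws_isspace (hl c hc))]
    obtain ⟨x, t, hxt⟩ := List.exists_cons_of_ne_nil h0
    have hgx : pvGood x := ht.1 x (by rw [hxt]; rfl)
    have hxns : PySem.Chars.isspace x = false := (good_char hgx.1 hgx.2.1 hgx.2.2).2
    have h1 : List.dropWhile PySem.Chars.isspace (tok ++ pend) = tok ++ pend := by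
      rw [hxt]
      simp only [List.cons_append, List.dropWhile_cons]
      rw [if_neg (by simp [hxns])]
    rw [h1, List.reverse_append, dropWhile_append_all (fun c hc => ws_isspace (hp c (by simpa using hc)))]
    have hrev : tok.reverse ≠ [] := by simpa using h0
    obtain ⟨g, r, hgr⟩ := List.exists_cons_of_ne_nil hrev
    have hg' : tok.getLast? = some g := by rw [← List.head?_reverse, hgr]; rfl
    have hgg : pvGood g := ht.2 g hg'
    have hgns : PySem.Chars.isspace g = false := (good_char hgg.1 hgg.2.1 hgg.2.2).2
    rw [hgr]
    simp only [List.dropWhile_cons]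
    rw [if_neg (by simp [hgns]), ← hgr]
    simp

theorem scan_acc : ∀ (l tok pend : List Char) (tokens : List (List Char)),
    pi_scanGo l tok pend tokens = tokens ++ pi_scanGo l tok pend [] := by
  intro l
  induction l with
  | nil =>
    intro tok pend tokens
    rw [pi_scanGo, pi_scanGo]
    by_cases h : tok ≠ [] <;> simp [h]
  | cons c rest ih =>
    intro tok pend tokens
    rw [pi_scanGo, pi_scanGo]
    by_cases h1 : c = '|' ∨ c = '\n' ∨ c = '\r'
    · rw [if_pos h1, if_pos h1, ih, ih [] [] (if tok ≠ [] then [] ++ [tok] else [])]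
      by_cases h : tok ≠ [] <;> simp [h]
    · rw [if_neg h1, if_neg h1]
      by_cases h2 : c = ' ' ∨ c = '\t'
      · rw [if_pos h2, if_pos h2]; exact ih _ _ _
      · rw [if_neg h2, if_neg h2]; exact ih _ _ _

theorem pi_scanGo_nil (tok pend : List Char) :
    pi_scanGo [] tok pend [] = if tok ≠ [] then [tok] else [] := by
  rw [pi_scanGo]; split <;> simp

theorem pi_scanGo_cons (c : Char) (rest tok pend : List Char) :
    pi_scanGo (c :: rest) tok pend [] =
      if c = '|' ∨ c = '\n' ∨ c = '\r' then
        (if tok ≠ [] then [tok] else []) ++ pi_scanGo rest [] [] []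
      else if c = ' ' ∨ c = '\t' then
        pi_scanGo rest tok (if tok ≠ [] then pend ++ [c] else pend) []
      else
        pi_scanGo rest (tok ++ pend ++ [c]) [] [] := by
  rw [pi_scanGo]
  by_cases h1 : c = '|' ∨ c = '\n' ∨ c = '\r'
  · rw [if_pos h1, if_pos h1, scan_acc]
    by_cases h : tok ≠ [] <;> simp [h]
  · rw [if_neg h1, if_neg h1]

theorem core : ∀ (l : List Char), (∀ c ∈ l, pvDomChar c = true) →
    ∀ (lead tok pend : List Char),
    (∀ c ∈ lead, pvWs c) → (∀ c ∈ pend, pvWs c) → (tok = [] → pend = []) → pvTokOK tok →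
    pvF (myGo (l.map pvPf) ((lead ++ tok ++ pend).reverse)) = pi_scanGo l tok pend [] := by
  intro l
  induction hn : l.length using Nat.strong_induction_on generalizing l with
  | _ n ih =>
  intro hdom lead tok pend hl hp he ht
  have hflush : (if PySem.Chars.strip (lead ++ tok ++ pend) ≠ [] then
      [PySem.Chars.strip (lead ++ tok ++ pend)] else []) = (if tok ≠ [] then [tok] else []) := by
    rw [strip_sandwich lead tok pend hl hp he ht]
  cases l with
  | nil =>
    rw [List.map_nil, myGo_nil, pi_scanGo_nil]
    by_cases h0 : tok = []
    · subst h0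
      rw [he rfl] at *
      simp only [List.append_nil]
      by_cases hld : lead = []
      · subst hld; simp [pvF]
      · rw [if_neg (by simpa using hld), if_neg (by simp)]
        have : PySem.Chars.strip lead = [] := by
          have := strip_sandwich lead [] [] hl (by simp) (fun _ => rfl) ⟨by simp, by simp⟩
          simpa using this
        simp [pvF, List.reverse_reverse, this]
    · rw [if_neg (by simp [h0]), if_pos h0]
      rw [List.reverse_reverse]
      rw [show pvF [lead ++ tok ++ pend] = _ from pvF_cons _ [], ]
      rw [strip_sandwich lead tok pend hl hp he ht]
      simp [pvF, h0]
  | cons c rest =>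
    have hdc : pvDomChar c = true := hdom c (by simp)
    have hdrest : ∀ x ∈ rest, pvDomChar x = true := fun x hx => hdom x (by simp [hx])
    rw [List.map_cons, pi_scanGo_cons]
    by_cases hsep : c = '|' ∨ c = '\n' ∨ c = '\r'
    · rw [if_pos hsep]
      by_cases hcr : c = '\r'
      · subst hcr
        have hpf : pvPf '\r' = '\r' := by decide
        rw [hpf, myGo_cons]
        cases rest with
        | nil =>
          rw [if_neg (by simp), if_pos (by decide), List.map_nil, myGo_nil]
          rw [pvF_cons]
          simp only [List.reverse_reverse]
          rw [hflush, pi_scanGo_nil]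
          simp [pvF]
        | cons d r' =>
          have hdd : pvDomChar d = true := hdrest d (by simp)
          have hdr' : ∀ x ∈ r', pvDomChar x = true := fun x hx => hdrest x (by simp [hx])
          have ihr' := ih r'.length (by subst hn; simp) r' rfl hdr' [] [] []
            (by simp) (by simp) (fun _ => rfl) ⟨by simp, by simp⟩
          simp only [List.append_nil, List.reverse_nil] at ihr'
          by_cases hdnl : pvPf d = '\n'
          · rw [List.map_cons, if_pos (by simp [hdnl]), List.tail_cons]
            rw [pvF_cons]
            simp only [List.reverse_reverse]
            rw [hflush, ihr']
            have hdsep : d = '|' ∨ d = '\n' ∨ d = '\r' := by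
              by_cases h : d = '|'
              · exact Or.inl h
              · right; left
                have : pvPf d = d := by simp [pvPf, h]
                rw [this] at hdnl; exact hdnl
            rw [pi_scanGo_cons, if_pos hdsep]
            simp
          · rw [List.map_cons, if_neg (by simp [hdnl]), if_pos (by decide)]
            rw [pvF_cons]
            simp only [List.reverse_reverse]
            rw [hflush]
            have ihrest := ih (d :: r').length (by subst hn; simp) (d :: r') rfl hdrest [] [] []
              (by simp) (by simp) (fun _ => rfl) ⟨by simp, by simp⟩
            simp only [List.append_nil, List.reverse_nil] at ihrest
            rw [List.map_cons] at ihrest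
            rw [ihrest]
      · have hpf : pvPf c = '\n' := by
          rcases hsep with rfl | rfl | rfl
          · decide
          · decide
          · exact absurd rfl hcr
        rw [hpf, myGo_cons, if_neg (by simp), if_pos (by decide)]
        rw [pvF_cons]
        simp only [List.reverse_reverse]
        rw [hflush]
        have ihrest := ih rest.length (by subst hn; simp) rest rfl hdrest [] [] []
          (by simp) (by simp) (fun _ => rfl) ⟨by simp, by simp⟩
        simp only [List.append_nil, List.reverse_nil] at ihrest
        rw [ihrest]
    · rw [if_neg hsep]
      have hncp : ¬ c = '|' := fun h => hsep (Or.inl h)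
      have hpf : pvPf c = c := by simp [pvPf, hncp]
      have hncr : ¬ c = '\r' := fun h => hsep (Or.inr (Or.inr h))
      rw [hpf, myGo_cons, if_neg (by simp [hncr])]
      by_cases hws : c = ' ' ∨ c = '\t'
      · rw [if_pos hws]
        have hb : pvIsB c = false := by rcases hws with rfl | rfl <;> decide
        rw [if_neg (by simp [hb])]
        by_cases h0 : tok = []
        · subst h0
          rw [he rfl]
          rw [if_neg (by simp)]
          have hstep : (c :: ((lead ++ [] ++ []).reverse) : List Char)
              = (((lead ++ [c]) ++ [] ++ []).reverse) := by simp
          rw [hstep]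
          exact ih rest.length (by subst hn; simp) rest rfl hdrest (lead ++ [c]) [] []
            (by intro x hx; rcases List.mem_append.mp hx with h | h
                · exact hl x h
                · simp at h; subst h; exact hws)
            (by simp) (fun _ => rfl) ⟨by simp, by simp⟩
        · rw [if_pos h0]
          have hstep : (c :: ((lead ++ tok ++ pend).reverse) : List Char)
              = ((lead ++ tok ++ (pend ++ [c])).reverse) := by simp
          rw [hstep]
          exact ih rest.length (by subst hn; simp) rest rfl hdrest lead tok (pend ++ [c])
            hl
            (by intro x hx; rcases List.mem_append.mp hx with h | h
                · exact hp x h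
                · simp at h; subst h; exact hws)
            (fun h => absurd h h0) ht
      · rw [if_neg hws]
        have hgood := good_char hdc hsep hws
        rw [if_neg (by simp [hgood.1])]
        have hstep : (c :: ((lead ++ tok ++ pend).reverse) : List Char)
            = ((lead ++ (tok ++ pend ++ [c]) ++ []).reverse) := by simp
        rw [hstep]
        refine ih rest.length (by subst hn; simp) rest rfl hdrest lead (tok ++ pend ++ [c]) []
          hl (by simp) (by simp) ?_
        constructor
        · intro x hx
          by_cases h0 : tok = []
          · have hpe := he h0
            subst h0; subst hpe
            simp only [List.nil_append] at hx
            have := Option.some.inj hx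
            subst this
            exact ⟨hdc, hsep, hws⟩
          · have hh : (tok ++ pend ++ [c]).head? = tok.head? := by
              obtain ⟨y, t, hyt⟩ := List.exists_cons_of_ne_nil h0
              rw [hyt]; rfl
            rw [hh] at hx
            exact ht.1 x hx
        · intro x hx
          rw [List.getLast?_concat] at hx
          have := Option.some.inj hx
          subst this
          exact ⟨hdc, hsep, hws⟩

theorem scan_eq (v : String) (hv : pvDomStr v = true) : pvGs v = pi_scan v := by
  have h1 := gs_toList v
  rw [replace_single] at h1
  have hdom : ∀ c ∈ v.toList, pvDomChar c = true := by
    simpa [pvDomStr, List.all_eq_true] using hv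
  have h2 := core v.toList hdom [] [] [] (by simp) (by simp) (fun _ => rfl) ⟨by simp, by simp⟩
  simp only [List.append_nil, List.reverse_nil] at h2
  have h3 : (pvGs v).map String.toList = pi_scanGo v.toList [] [] [] := h1.trans h2
  unfold pi_scan
  rw [← h3, List.map_map]
  have : (String.ofList ∘ String.toList) = id := by
    funext s
    exact String.ext (by simp [String.ofList])
  rw [this, List.map_id]

theorem main_eq (values : List String) (h : Dom_parse_image_urls values) :
    parse_image_urls values = parse_image_urls_alt values := by
  unfold parse_image_urls parse_image_urls_alt
  rw [A_eq values [], B_eq values []]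
  simp only [List.nil_append]
  unfold Dom_parse_image_urls at h
  induction values with
  | nil => rfl
  | cons v t ih =>
    simp only [List.all_cons, Bool.and_eq_true] at h
    simp only [List.flatMap_cons]
    rw [scan_eq v h.1, ih h.2]

-- ===== VERDICT (by name: the statement is the Claim_ definition above) =====
theorem parse_image_urls_spec : Claim_equal_parse_image_urls := by
  intro values h
  unfold Spec_parse_image_urls
  exact main_eq values h
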